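-- pv_equiv track=rewrite | github.com/TarekDjaker/Criteo-project | ultimate_project/flood_fill.py | get_region_size
-- ===== SOURCE A (Python) =====
-- from collections import deque
-- from typing import List, Tuple, Set
--
-- def get_region_size(image: List[List[int]], sr: int, sc: int) -> int:
--     """
--     Get size of connected region
--     Useful for: Image analysis, game mechanics
--
--     Time: O(m*n)
--     Space: O(m*n)
--     """
--     if not image or not image[0]:
--         return 0
--
--     rows, cols = len(image), len(image[0])
--     target_color = image[sr][sc]
--     visited = set()
--
--     queue = deque([(sr, sc)])
--     visited.add((sr, sc))
--     size = 0
--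
--     while queue:
--         r, c = queue.popleft()
--         size += 1
--
--         for dr, dc in [(0, 1), (1, 0), (0, -1), (-1, 0)]:
--             nr, nc = r + dr, c + dc
--
--             if (0 <= nr < rows and
--                 0 <= nc < cols and
--                 (nr, nc) not in visited and
--                 image[nr][nc] == target_color):
--
--                 visited.add((nr, nc))
--                 queue.append((nr, nc))
--
--     return size
-- ===== SOURCE B (Python) =====
-- def get_region_size(image, sr, sc):
--     """Size of the connected same-color region.
--
--     Connected-component label propagation: no queue/stack and no frontier;
--     the region starts as {(sr, sc)} and whole-grid raster sweeps repeatedly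
--     absorb any target-colored cell adjacent to the region, until a sweep
--     adds nothing; the answer is the final region's cardinality.
--     """
--     if not image or not image[0]:
--         return 0
--
--     rows, cols = len(image), len(image[0])
--     target = image[sr][sc]
--     region = {(sr, sc)}
--
--     while True:
--         added = False
--         for r in range(rows):
--             for c in range(cols):
--                 if ((r, c) not in region and image[r][c] == target and
--                         ((r, c + 1) in region or (r + 1, c) in region or
--                          (r, c - 1) in region or (r - 1, c) in region)):
--                     region.add((r, c))
--                     added = True
--         if not added:
--             return len(region)
-- ===== Notes on version B (the rewrite author's own statement) =====
-- stated objective: alternative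
-- what changed: Replaces A's frontier BFS (deque, visited set, per-cell neighbour pushes) with connected-component label propagation: the region starts as the singleton start cell and whole-grid raster sweeps repeatedly absorb any target-colored cell adjacent to the current region until a sweep adds nothing, returning the region's cardinality; no queue or frontier exists at all.
-- outside the precondition, e.g. on get_region_size([[1, 2], [9]], 0, 0): A returns 1, B raises IndexError
import Mathlib
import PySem

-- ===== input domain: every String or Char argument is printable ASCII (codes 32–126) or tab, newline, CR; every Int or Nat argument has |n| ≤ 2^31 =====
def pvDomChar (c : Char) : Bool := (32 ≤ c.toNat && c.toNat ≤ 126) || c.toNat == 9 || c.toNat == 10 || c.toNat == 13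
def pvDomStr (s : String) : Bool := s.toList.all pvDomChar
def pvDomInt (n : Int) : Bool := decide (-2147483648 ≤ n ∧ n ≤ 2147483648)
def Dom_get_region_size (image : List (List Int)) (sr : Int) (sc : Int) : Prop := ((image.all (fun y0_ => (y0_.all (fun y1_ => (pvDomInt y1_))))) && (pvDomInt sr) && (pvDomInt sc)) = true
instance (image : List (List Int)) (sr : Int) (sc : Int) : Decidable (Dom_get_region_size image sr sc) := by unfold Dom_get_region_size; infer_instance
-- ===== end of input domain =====

-- B replaces A's frontier BFS by connected-component label propagation: whole-grid raster
-- sweeps absorb target-colored cells adjacent to the region until a sweep adds nothing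
-- (objective: alternative; not claimed faster).

-- image[r][c]; the .getD defaults are never reached under Pre_get_region_size
def pvCell (image : List (List Int)) (r c : Int) : Int :=
  (PySem.List.pyGet? ((PySem.List.pyGet? image r).getD []) c).getD 0

-- ===== PORT A =====
-- the literal direction list [(0,1),(1,0),(0,-1),(-1,0)]
def pvDirs : List (Int × Int) := [(0, 1), (1, 0), (0, -1), (-1, 0)]

-- body of A's `for dr, dc in …` loop: maybe enqueue+mark neighbour (nr, nc)
def pvBfsPush (image : List (List Int)) (rows cols target : Int) (n : Int × Int)
    (st : List (Int × Int) × PySem.Set (Int × Int)) :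
    List (Int × Int) × PySem.Set (Int × Int) :=
  if 0 ≤ n.1 ∧ n.1 < rows ∧ 0 ≤ n.2 ∧ n.2 < cols ∧ n ∉ st.2 ∧ pvCell image n.1 n.2 = target then
    (st.1 ++ [n], PySem.Set.add st.2 n)
  else st

-- A's `while queue` loop; the fuel only makes the recursion structural and is never exhausted
def pvBfsLoop (image : List (List Int)) (rows cols target : Int) :
    Nat → List (Int × Int) → PySem.Set (Int × Int) → Int → Int
  | 0, _, _, size => size
  | fuel + 1, queue, visited, size =>
    match queue with
    | [] => size
    | (r, c) :: rest =>
      let st := pvDirs.foldl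
        (fun st d => pvBfsPush image rows cols target (r + d.1, c + d.2) st) (rest, visited)
      pvBfsLoop image rows cols target fuel st.1 st.2 (size + 1)

def get_region_size (image : List (List Int)) (sr : Int) (sc : Int) : Int :=
  if image = [] ∨ image.headI = [] then 0
  else
    let rows : Int := image.length
    let cols : Int := image.headI.length
    let target := pvCell image sr sc
    pvBfsLoop image rows cols target (image.length * image.headI.length + 2)
      [(sr, sc)] (PySem.Set.ofList [(sr, sc)]) 0

-- ===== PORT B =====
-- B's inner-loop condition: `(r,c) not in region and image[r][c] == target and (<a neighbour> in region)`
abbrev pvCond (image : List (List Int)) (target : Int) (R : List (Int × Int)) (x : Int × Int) : Prop :=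
  x ∉ R ∧ pvCell image x.1 x.2 = target ∧
    ((x.1, x.2 + 1) ∈ R ∨ (x.1 + 1, x.2) ∈ R ∨ (x.1, x.2 - 1) ∈ R ∨ (x.1 - 1, x.2) ∈ R)

-- body of B's innermost `if`: maybe absorb cell x into the region, raising the `added` flag
def pvSweepStep (image : List (List Int)) (target : Int)
    (st : PySem.Set (Int × Int) × Bool) (x : Int × Int) : PySem.Set (Int × Int) × Bool :=
  if pvCond image target st.1 x then (PySem.Set.add st.1 x, true) else st

-- one whole-grid raster sweep (`for r in range(rows): for c in range(cols): …`)
def pvSweep (image : List (List Int)) (rows cols target : Int)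
    (region : PySem.Set (Int × Int)) : PySem.Set (Int × Int) × Bool :=
  (PySem.List.pyRange 0 rows 1).foldl (fun st r =>
    (PySem.List.pyRange 0 cols 1).foldl (fun st c => pvSweepStep image target st (r, c)) st)
    (region, false)

-- B's `while True` loop; the fuel only makes the recursion structural and is never exhausted
def pvLPLoop (image : List (List Int)) (rows cols target : Int) :
    Nat → PySem.Set (Int × Int) → Int
  | 0, region => region.length
  | fuel + 1, region =>
    let st := pvSweep image rows cols target region
    if st.2 then pvLPLoop image rows cols target fuel st.1 else (st.1.length : Int)

def get_region_size_alt (image : List (List Int)) (sr : Int) (sc : Int) : Int :=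
  if image = [] ∨ image.headI = [] then 0
  else
    let rows : Int := image.length
    let cols : Int := image.headI.length
    let target := pvCell image sr sc
    pvLPLoop image rows cols target (image.length * image.headI.length + 3)
      (PySem.Set.ofList [(sr, sc)])

-- ===== PRECONDITION & SPEC =====
-- Pre_ excludes exactly (a) start indices outside Python's wrap range (A raises IndexError at
-- image[sr][sc]) and (b) ragged images with a row shorter than the first row, on which a
-- neighbour/sweep read image[r][c] can raise IndexError (B's whole-grid sweep always reads
-- every cell, so B raises on every such ragged image; A still returns when its short rows
-- happen to be unreachable).
def Pre_get_region_size (image : List (List Int)) (sr : Int) (sc : Int) : Prop :=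
  image = [] ∨ image.headI = [] ∨
    (-(image.length : Int) ≤ sr ∧ sr < image.length ∧
     -(image.headI.length : Int) ≤ sc ∧ sc < image.headI.length ∧
     ∀ row ∈ image, image.headI.length ≤ row.length)
instance (image : List (List Int)) (sr : Int) (sc : Int) : Decidable (Pre_get_region_size image sr sc) := by
  unfold Pre_get_region_size; infer_instance

def pvWitness_get_region_size : List (List Int) × Int × Int := ([[1, 1], [0, 1]], 0, 0)

def Spec_get_region_size (image : List (List Int)) (sr : Int) (sc : Int) (out : Int) : Prop := out = get_region_size_alt image sr sc
instance (image : List (List Int)) (sr : Int) (sc : Int) (out : Int) : Decidable (Spec_get_region_size image sr sc out) := by unfold Spec_get_region_size; infer_instance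

-- ===== CLAIM (what is proved, stated in full; the proofs are below) =====
def Claim_equal_get_region_size : Prop := ∀ (image : List (List Int)) (sr : Int) (sc : Int), Dom_get_region_size image sr sc → Pre_get_region_size image sr sc → Spec_get_region_size image sr sc (get_region_size image sr sc)

-- ===== LEMMAS AND PROOFS =====

-- the four neighbours of a cell, in A's direction order
def pvNbrs (p : Int × Int) : List (Int × Int) :=
  [(p.1, p.2 + 1), (p.1 + 1, p.2), (p.1, p.2 - 1), (p.1 - 1, p.2)]

-- a cell that may be added to the region: in bounds and of the target colour
def pvValid (image : List (List Int)) (rows cols target : Int) (p : Int × Int) : Prop :=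
  0 ≤ p.1 ∧ p.1 < rows ∧ 0 ≤ p.2 ∧ p.2 < cols ∧ pvCell image p.1 p.2 = target

-- cells reachable from the start through valid cells (the start itself need not be valid)
inductive pvReach (image : List (List Int)) (rows cols target : Int) (s : Int × Int) :
    Int × Int → Prop where
  | refl : pvReach image rows cols target s s
  | step {p q : Int × Int} : pvReach image rows cols target s p → q ∈ pvNbrs p →
      pvValid image rows cols target q → pvReach image rows cols target s q

theorem pvNbrs_symm {p q : Int × Int} (h : q ∈ pvNbrs p) : p ∈ pvNbrs q := by
  cases p with
  | mk p1 p2 =>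
    cases q with
    | mk q1 q2 =>
      simp only [pvNbrs, List.mem_cons, List.not_mem_nil, or_false, Prod.mk.injEq] at h ⊢
      omega

-- every closed set containing the start contains everything reachable
theorem pvReach_subset {image : List (List Int)} {rows cols target : Int} {s : Int × Int}
    {V : List (Int × Int)} (hs : s ∈ V)
    (hcl : ∀ p ∈ V, ∀ q ∈ pvNbrs p, pvValid image rows cols target q → q ∈ V) :
    ∀ x, pvReach image rows cols target s x → x ∈ V := by
  intro x hx
  induction hx with
  | refl => exact hs
  | step hp hmem hval ih => exact hcl _ ih _ hmem hval

-- a duplicate-free list of valid cells (plus possibly the start) has at most rows*cols+1 cells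
theorem pvLen_le {image : List (List Int)} {rows cols target : Int} {s : Int × Int}
    {V : List (Int × Int)} (hnd : V.Nodup)
    (hv : ∀ p ∈ V, pvValid image rows cols target p ∨ p = s) :
    V.length ≤ rows.toNat * cols.toNat + 1 := by
  have h1 : V.toFinset.card = V.length := List.toFinset_card_of_nodup hnd
  have h2 : V.toFinset ⊆ (Finset.Ico (0 : ℤ) rows ×ˢ Finset.Ico (0 : ℤ) cols) ∪ {s} := by
    intro p hp
    rw [List.mem_toFinset] at hp
    rcases hv p hp with h | h
    · rcases h with ⟨h1, h2, h3, h4, _⟩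
      simp only [Finset.mem_union, Finset.mem_product, Finset.mem_Ico]
      exact Or.inl ⟨⟨h1, h2⟩, ⟨h3, h4⟩⟩
    · subst h; simp
  calc V.length = V.toFinset.card := h1.symm
    _ ≤ ((Finset.Ico (0 : ℤ) rows ×ˢ Finset.Ico (0 : ℤ) cols) ∪ {s}).card := Finset.card_le_card h2
    _ ≤ (Finset.Ico (0 : ℤ) rows ×ˢ Finset.Ico (0 : ℤ) cols).card + ({s} : Finset (Int × Int)).card :=
        Finset.card_union_le _ _
    _ = rows.toNat * cols.toNat + 1 := by
        rw [Finset.card_product, Finset.card_singleton, Int.card_Ico, Int.card_Ico,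
          sub_zero, sub_zero]

-- shadow of A's loop that also returns the final visited set
def pvBfsShadow (image : List (List Int)) (rows cols target : Int) :
    Nat → List (Int × Int) → PySem.Set (Int × Int) → Int → Int × PySem.Set (Int × Int)
  | 0, _, visited, size => (size, visited)
  | fuel + 1, queue, visited, size =>
    match queue with
    | [] => (size, visited)
    | (r, c) :: rest =>
      let st := pvDirs.foldl
        (fun st d => pvBfsPush image rows cols target (r + d.1, c + d.2) st) (rest, visited)
      pvBfsShadow image rows cols target fuel st.1 st.2 (size + 1)

theorem pvBfsLoop_eq_shadow (image : List (List Int)) (rows cols target : Int) :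
    ∀ (fuel : Nat) (queue : List (Int × Int)) (visited : PySem.Set (Int × Int)) (size : Int),
      pvBfsLoop image rows cols target fuel queue visited size =
        (pvBfsShadow image rows cols target fuel queue visited size).1 := by
  intro fuel
  induction fuel with
  | zero => intro queue visited size; rfl
  | succ f ih =>
    intro queue visited size
    cases queue with
    | nil => rfl
    | cons hd rest =>
      cases hd with
      | mk r c => simp only [pvBfsLoop, pvBfsShadow]; exact ih _ _ _

-- rewriting A's fold over directions into a fold over the neighbour list
theorem pvFoldDirs (image : List (List Int)) (rows cols target : Int) (r c : Int)
    (st : List (Int × Int) × PySem.Set (Int × Int)) :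
    pvDirs.foldl (fun st d => pvBfsPush image rows cols target (r + d.1, c + d.2) st) st =
      (pvNbrs (r, c)).foldl (fun st n => pvBfsPush image rows cols target n st) st := by
  simp [pvDirs, pvNbrs, List.foldl, sub_eq_add_neg]

-- one round of A's neighbour pushes: queue and visited are extended by the same new cells
theorem pvPushList_spec (image : List (List Int)) (rows cols target : Int) :
    ∀ (ns : List (Int × Int)) (q : List (Int × Int)) (V : PySem.Set (Int × Int)),
      V.Nodup →
      (∃ new, (ns.foldl (fun st n => pvBfsPush image rows cols target n st) (q, V)) = (q ++ new, V ++ new) ∧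
        (V ++ new).Nodup ∧
        (∀ p ∈ new, p ∈ ns ∧ pvValid image rows cols target p) ∧
        (∀ n ∈ ns, pvValid image rows cols target n → n ∈ V ++ new)) := by
  intro ns
  induction ns with
  | nil =>
    intro q V hnd
    exact ⟨[], by simp, by simpa using hnd, by simp, by simp⟩
  | cons n ns ih =>
    intro q V hnd
    by_cases hg : 0 ≤ n.1 ∧ n.1 < rows ∧ 0 ≤ n.2 ∧ n.2 < cols ∧ n ∉ V ∧ pvCell image n.1 n.2 = target
    · have hnmem : n ∉ V := hg.2.2.2.2.1
      have hval : pvValid image rows cols target n := ⟨hg.1, hg.2.1, hg.2.2.1, hg.2.2.2.1, hg.2.2.2.2.2⟩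
      have hadd : PySem.Set.add V n = V ++ [n] := PySem.Set.add_of_not_mem hnmem
      have hstep : pvBfsPush image rows cols target n (q, V) = (q ++ [n], V ++ [n]) := by
        simp only [pvBfsPush, if_pos hg, hadd]
      have hnd' : (V ++ [n]).Nodup := by
        refine List.Nodup.append hnd (List.nodup_singleton n) ?_
        intro x hx hx'
        rw [List.mem_singleton] at hx'
        subst hx'
        exact hnmem hx
      obtain ⟨new, heq, hnodup, hprov, hcov⟩ := ih (q ++ [n]) (V ++ [n]) hnd'
      refine ⟨[n] ++ new, ?_, ?_, ?_, ?_⟩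
      · simp only [List.foldl_cons, hstep]
        rw [heq]; simp
      · rw [← List.append_assoc]; exact hnodup
      · intro p hp
        rcases List.mem_append.mp hp with hp | hp
        · rcases List.mem_singleton.mp hp with rfl
          exact ⟨List.mem_cons_self, hval⟩
        · obtain ⟨hin, hv⟩ := hprov p hp
          exact ⟨List.mem_cons_of_mem _ hin, hv⟩
      · intro m hm hv
        rcases List.mem_cons.mp hm with rfl | hm
        · simp
        · have := hcov m hm hv
          rw [List.append_assoc] at this
          exact this
    · have hstep : pvBfsPush image rows cols target n (q, V) = (q, V) := by
        simp only [pvBfsPush, if_neg hg]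
      obtain ⟨new, heq, hnodup, hprov, hcov⟩ := ih q V hnd
      refine ⟨new, ?_, hnodup, ?_, ?_⟩
      · simp only [List.foldl_cons, hstep]; exact heq
      · intro p hp
        obtain ⟨hin, hv⟩ := hprov p hp
        exact ⟨List.mem_cons_of_mem _ hin, hv⟩
      · intro m hm hv
        rcases List.mem_cons.mp hm with rfl | hm
        · -- the guard failed though m is valid, so m was already visited
          have hmV : m ∈ V := by
            by_contra hmV
            exact hg ⟨hv.1, hv.2.1, hv.2.2.1, hv.2.2.2.1, hmV, hv.2.2.2.2⟩
          exact List.mem_append.mpr (Or.inl hmV)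
        · exact hcov m hm hv

-- main BFS invariant lemma
theorem pvBfs_main (image : List (List Int)) (rows cols target : Int) (s : Int × Int) :
    ∀ (fuel : Nat) (queue : List (Int × Int)) (visited : PySem.Set (Int × Int)) (size : Int),
      visited.Nodup →
      (∀ p ∈ queue, p ∈ visited) →
      queue.Nodup →
      (∀ p ∈ visited, pvValid image rows cols target p ∨ p = s) →
      (∀ p ∈ visited, pvReach image rows cols target s p) →
      (∀ p ∈ visited, p ∉ queue → ∀ q ∈ pvNbrs p, pvValid image rows cols target q → q ∈ visited) →
      queue.length + (rows.toNat * cols.toNat + 1 - visited.length) < fuel →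
      ((pvBfsShadow image rows cols target fuel queue visited size).1 + (visited.length : Int) =
          size + queue.length + ((pvBfsShadow image rows cols target fuel queue visited size).2.length : Int)) ∧
        (∀ p ∈ visited, p ∈ (pvBfsShadow image rows cols target fuel queue visited size).2) ∧
        (pvBfsShadow image rows cols target fuel queue visited size).2.Nodup ∧
        (∀ p ∈ (pvBfsShadow image rows cols target fuel queue visited size).2,
          pvReach image rows cols target s p) ∧
        (∀ p ∈ (pvBfsShadow image rows cols target fuel queue visited size).2,
          ∀ q ∈ pvNbrs p, pvValid image rows cols target q →
            q ∈ (pvBfsShadow image rows cols target fuel queue visited size).2) := by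
  intro fuel
  induction fuel with
  | zero =>
    intro queue visited size _ _ _ _ _ _ hf
    exact absurd hf (by omega)
  | succ f ih =>
    intro queue visited size hndV hqV hndQ hVv hVr hcl hf
    cases queue with
    | nil =>
      refine ⟨by simp [pvBfsShadow], by simp [pvBfsShadow], by simpa [pvBfsShadow] using hndV,
        by simpa [pvBfsShadow] using hVr, ?_⟩
      intro p hp q hq hv
      simp only [pvBfsShadow] at hp ⊢
      exact hcl p hp (by simp) q hq hv
    | cons hd rest =>
      cases hd with
      | mk r c =>
        obtain ⟨new, heq, hnodup, hprov, hcov⟩ :=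
          pvPushList_spec image rows cols target (pvNbrs (r, c)) rest visited hndV
        have hshadow : pvBfsShadow image rows cols target (f + 1) ((r, c) :: rest) visited size =
            pvBfsShadow image rows cols target f (rest ++ new) (visited ++ new) (size + 1) := by
          simp only [pvBfsShadow]
          rw [pvFoldDirs, heq]
        -- facts about the new state
        have hrcV : (r, c) ∈ visited := hqV (r, c) List.mem_cons_self
        have hdisj := (List.nodup_append.mp hnodup).2.2
        have hnewV : ∀ p ∈ new, p ∉ visited := fun p hp hpV => (hdisj p hpV p hp) rfl
        have hrcnew : (r, c) ∉ new := fun h => hnewV _ h hrcV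
        have hrestnew : ∀ p ∈ new, p ∉ rest := by
          intro p hp hpr
          exact hnewV p hp (hqV p (List.mem_cons_of_mem _ hpr))
        have hlen' : (visited ++ new).length ≤ rows.toNat * cols.toNat + 1 := by
          refine pvLen_le (image := image) (rows := rows) (cols := cols) (target := target) (s := s) hnodup ?_
          intro p hp
          rcases List.mem_append.mp hp with hp | hp
          · exact hVv p hp
          · exact Or.inl (hprov p hp).2
        have hlenV : visited.length ≤ rows.toNat * cols.toNat + 1 := pvLen_le hndV hVv
        have ihres := ih (rest ++ new) (visited ++ new) (size + 1)
          hnodup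
          (by
            intro p hp
            rcases List.mem_append.mp hp with hp | hp
            · exact List.mem_append.mpr (Or.inl (hqV p (List.mem_cons_of_mem _ hp)))
            · exact List.mem_append.mpr (Or.inr hp))
          (by
            rw [List.nodup_append]
            refine ⟨(List.nodup_cons.mp hndQ).2, (List.nodup_append.mp hnodup).2.1, ?_⟩
            intro a ha b hb hab
            subst hab
            exact hrestnew a hb ha)
          (by
            intro p hp
            rcases List.mem_append.mp hp with hp | hp
            · exact hVv p hp
            · exact Or.inl (hprov p hp).2)
          (by
            intro p hp
            rcases List.mem_append.mp hp with hp | hp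
            · exact hVr p hp
            · exact pvReach.step (hVr _ hrcV) (hprov p hp).1 (hprov p hp).2)
          (by
            intro p hp hpq q hq hv
            rcases List.mem_append.mp hp with hp | hp
            · by_cases hprc : p = (r, c)
              · subst hprc
                exact hcov q hq hv
              · have hpq' : p ∉ ((r, c) :: rest) := by
                  intro h
                  rcases List.mem_cons.mp h with h | h
                  · exact hprc h
                  · exact hpq (List.mem_append.mpr (Or.inl h))
                have := hcl p hp hpq' q hq hv
                exact List.mem_append.mpr (Or.inl this)
            · exact absurd (List.mem_append.mpr (Or.inr hp)) hpq)
          (by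
            simp only [List.length_append, List.length_cons] at hf hlen' hlenV ⊢
            generalize rows.toNat * cols.toNat = m at hf hlen' hlenV ⊢
            omega)
        obtain ⟨c1, c2, c3, c4, c5⟩ := ihres
        rw [hshadow]
        refine ⟨?_, ?_, c3, c4, c5⟩
        · have h2 : ((visited ++ new).length : Int) = visited.length + new.length := by
            push_cast [List.length_append]; ring
          have h3 : ((rest ++ new).length : Int) = rest.length + new.length := by
            push_cast [List.length_append]; ring
          have h4 : ((((r, c) :: rest)).length : Int) = rest.length + 1 := by simp
          rw [h4]
          omega
        · intro p hp
          exact c2 p (List.mem_append.mpr (Or.inl hp))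

-- ---------- B-side lemmas: label propagation ----------

-- the grid cells a sweep visits, in raster order
def pvCells (rows cols : Int) : List (Int × Int) :=
  (PySem.List.pyRange 0 rows 1).flatMap (fun r =>
    (PySem.List.pyRange 0 cols 1).map (fun c => (r, c)))

theorem pvFoldl_flatMap {α β γ : Type} (f : γ → β → γ) (g : α → List β) :
    ∀ (l : List α) (init : γ),
      (l.flatMap g).foldl f init = l.foldl (fun st a => (g a).foldl f st) init := by
  intro l
  induction l with
  | nil => intro init; rfl
  | cons a l ih =>
    intro init
    simp only [List.flatMap_cons, List.foldl_append, List.foldl_cons]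
    exact ih _

-- the nested range folds of a sweep are the single fold over the raster cell list
theorem pvSweep_eq (image : List (List Int)) (rows cols target : Int)
    (region : PySem.Set (Int × Int)) :
    pvSweep image rows cols target region =
      (pvCells rows cols).foldl (pvSweepStep image target) (region, false) := by
  unfold pvSweep pvCells
  rw [pvFoldl_flatMap]
  simp only [List.foldl_map]

theorem pvMem_cells {rows cols : Int} {x : Int × Int} :
    x ∈ pvCells rows cols ↔ 0 ≤ x.1 ∧ x.1 < rows ∧ 0 ≤ x.2 ∧ x.2 < cols := by
  cases x with
  | mk a b =>
    simp only [pvCells, List.mem_flatMap, List.mem_map, PySem.List.mem_pyRange_one,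
      Prod.mk.injEq]
    constructor
    · rintro ⟨r, hr, c, hc, rfl, rfl⟩
      exact ⟨hr.1, hr.2, hc.1, hc.2⟩
    · rintro ⟨h1, h2, h3, h4⟩
      exact ⟨a, ⟨h1, h2⟩, b, ⟨h3, h4⟩, rfl, rfl⟩

-- once the `added` flag is up it stays up
theorem pvSweep_flag (image : List (List Int)) (target : Int) :
    ∀ (cells : List (Int × Int)) (R : PySem.Set (Int × Int)),
      (cells.foldl (pvSweepStep image target) (R, true)).2 = true := by
  intro cells
  induction cells with
  | nil => intro R; rfl
  | cons x cells ih =>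
    intro R
    simp only [List.foldl_cons, pvSweepStep]
    split_ifs
    · exact ih _
    · exact ih _

-- a sweep whose flag stays down changed nothing and found no absorbable cell
theorem pvSweep_false (image : List (List Int)) (target : Int) :
    ∀ (cells : List (Int × Int)) (R : PySem.Set (Int × Int)),
      (cells.foldl (pvSweepStep image target) (R, false)).2 = false →
      (cells.foldl (pvSweepStep image target) (R, false)) = (R, false) ∧
        ∀ x ∈ cells, ¬ pvCond image target R x := by
  intro cells
  induction cells with
  | nil => intro R _; exact ⟨rfl, by simp⟩
  | cons x cells ih =>
    intro R hflag
    by_cases hc : pvCond image target R x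
    · exfalso
      simp only [List.foldl_cons, pvSweepStep, if_pos hc] at hflag
      rw [pvSweep_flag] at hflag
      simp at hflag
    · have hstep : pvSweepStep image target (R, false) x = (R, false) := by
        simp only [pvSweepStep, if_neg hc]
      simp only [List.foldl_cons, hstep] at hflag ⊢
      obtain ⟨h1, h2⟩ := ih R hflag
      refine ⟨h1, ?_⟩
      intro y hy
      rcases List.mem_cons.mp hy with rfl | hy
      · exact hc
      · exact h2 y hy

-- a sweep appends some new cells, all valid and reachable; the flag records whether any appeared
theorem pvSweep_spec (image : List (List Int)) (rows cols target : Int) (s : Int × Int) :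
    ∀ (cells : List (Int × Int)) (R : PySem.Set (Int × Int)) (a : Bool),
      R.Nodup →
      (∀ p ∈ R, pvValid image rows cols target p ∨ p = s) →
      (∀ p ∈ R, pvReach image rows cols target s p) →
      (∀ x ∈ cells, 0 ≤ x.1 ∧ x.1 < rows ∧ 0 ≤ x.2 ∧ x.2 < cols) →
      ∃ new, cells.foldl (pvSweepStep image target) (R, a) = (R ++ new, a || !new.isEmpty) ∧
        (R ++ new).Nodup ∧
        (∀ p ∈ R ++ new, pvValid image rows cols target p ∨ p = s) ∧
        (∀ p ∈ R ++ new, pvReach image rows cols target s p) := by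
  intro cells
  induction cells with
  | nil =>
    intro R a hnd hv hr _
    exact ⟨[], by simp, by simpa using hnd, by simpa using hv, by simpa using hr⟩
  | cons x cells ih =>
    intro R a hnd hv hr hb
    by_cases hc : pvCond image target R x
    · obtain ⟨hxR, hcol, hnbr⟩ := hc
      have hxb := hb x List.mem_cons_self
      have hval : pvValid image rows cols target x := ⟨hxb.1, hxb.2.1, hxb.2.2.1, hxb.2.2.2, hcol⟩
      -- the witnessing neighbour q ∈ R with x ∈ pvNbrs q
      have hq : ∃ q ∈ R, x ∈ pvNbrs q := by
        rcases hnbr with h | h | h | h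
        · exact ⟨_, h, pvNbrs_symm (by simp [pvNbrs])⟩
        · exact ⟨_, h, pvNbrs_symm (by simp [pvNbrs])⟩
        · exact ⟨_, h, pvNbrs_symm (by simp [pvNbrs])⟩
        · exact ⟨_, h, pvNbrs_symm (by simp [pvNbrs])⟩
      obtain ⟨q, hqR, hxq⟩ := hq
      have hreach : pvReach image rows cols target s x :=
        pvReach.step (hr q hqR) hxq hval
      have hadd : PySem.Set.add R x = R ++ [x] := PySem.Set.add_of_not_mem hxR
      have hstep : pvSweepStep image target (R, a) x = (R ++ [x], true) := by
        simp only [pvSweepStep, if_pos (⟨hxR, hcol, hnbr⟩ : pvCond image target R x), hadd]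
      have hnd' : (R ++ [x]).Nodup := by
        refine List.Nodup.append hnd (List.nodup_singleton x) ?_
        intro y hy hy'
        rw [List.mem_singleton] at hy'
        subst hy'
        exact hxR hy
      have hv' : ∀ p ∈ R ++ [x], pvValid image rows cols target p ∨ p = s := by
        intro p hp
        rcases List.mem_append.mp hp with hp | hp
        · exact hv p hp
        · rcases List.mem_singleton.mp hp with rfl; exact Or.inl hval
      have hr' : ∀ p ∈ R ++ [x], pvReach image rows cols target s p := by
        intro p hp
        rcases List.mem_append.mp hp with hp | hp
        · exact hr p hp
        · rcases List.mem_singleton.mp hp with rfl; exact hreach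
      obtain ⟨new, heq, h1, h2, h3⟩ := ih (R ++ [x]) true hnd' hv' hr'
        (fun y hy => hb y (List.mem_cons_of_mem _ hy))
      refine ⟨[x] ++ new, ?_, ?_, ?_, ?_⟩
      · simp only [List.foldl_cons, hstep]
        rw [heq]
        simp
      · rw [← List.append_assoc]; exact h1
      · rw [← List.append_assoc]; exact h2
      · rw [← List.append_assoc]; exact h3
    · have hstep : pvSweepStep image target (R, a) x = (R, a) := by
        simp only [pvSweepStep, if_neg hc]
      obtain ⟨new, heq, h1, h2, h3⟩ := ih R a hnd hv hr
        (fun y hy => hb y (List.mem_cons_of_mem _ hy))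
      exact ⟨new, by simp only [List.foldl_cons, hstep]; exact heq, h1, h2, h3⟩

-- main label-propagation loop lemma: the loop returns the size of a closed reachable superset
theorem pvLP_main (image : List (List Int)) (rows cols target : Int) (s : Int × Int) :
    ∀ (fuel : Nat) (R : PySem.Set (Int × Int)),
      R.Nodup →
      (∀ p ∈ R, pvValid image rows cols target p ∨ p = s) →
      (∀ p ∈ R, pvReach image rows cols target s p) →
      rows.toNat * cols.toNat + 2 ≤ fuel + R.length →
      ∃ F : List (Int × Int), pvLPLoop image rows cols target fuel R = (F.length : Int) ∧
        (∀ p ∈ R, p ∈ F) ∧ F.Nodup ∧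
        (∀ p ∈ F, pvReach image rows cols target s p) ∧
        (∀ p ∈ F, ∀ q ∈ pvNbrs p, pvValid image rows cols target q → q ∈ F) := by
  intro fuel
  induction fuel with
  | zero =>
    intro R hnd hv _ hf
    have := pvLen_le (image := image) (rows := rows) (cols := cols) (target := target)
      (s := s) hnd hv
    omega
  | succ f ih =>
    intro R hnd hv hr hf
    obtain ⟨new, heq, hnd', hv', hr'⟩ := pvSweep_spec image rows cols target s
      (pvCells rows cols) R false hnd hv hr (fun x hx => pvMem_cells.mp hx)
    have hloop : pvLPLoop image rows cols target (f + 1) R =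
        (if (!new.isEmpty) = true then pvLPLoop image rows cols target f (R ++ new)
         else ((R ++ new).length : Int)) := by
      simp only [pvLPLoop, pvSweep_eq, heq, Bool.false_or]
    cases hne : new.isEmpty with
    | false =>
      -- something was added: recurse with the strictly larger region
      have hlen : 1 ≤ new.length := by
        cases new with
        | nil => simp at hne
        | cons _ _ => simp
      obtain ⟨F, hFe, hFsub, hFnd, hFr, hFcl⟩ := ih (R ++ new) hnd' hv' hr'
        (by simp only [List.length_append]; omega)
      refine ⟨F, ?_, ?_, hFnd, hFr, hFcl⟩
      · rw [hloop, hne]; simpa using hFe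
      · intro p hp
        exact hFsub p (List.mem_append.mpr (Or.inl hp))
    | true =>
      -- fixpoint: nothing was added, the region is closed
      have hnew : new = [] := List.isEmpty_iff.mp hne
      subst hnew
      have hflag : ((pvCells rows cols).foldl (pvSweepStep image target) (R, false)).2 = false := by
        rw [heq]; rfl
      obtain ⟨_, hnc⟩ := pvSweep_false image target (pvCells rows cols) R hflag
      refine ⟨R, ?_, fun p hp => hp, hnd, hr, ?_⟩
      · rw [hloop, hne]; simp
      · intro p hp q hq hval
        by_contra hqR
        have hqcells : q ∈ pvCells rows cols :=
          pvMem_cells.mpr ⟨hval.1, hval.2.1, hval.2.2.1, hval.2.2.2.1⟩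
        refine hnc q hqcells ⟨hqR, hval.2.2.2.2, ?_⟩
        -- p is one of q's four neighbours and lies in R
        have hpq : p ∈ pvNbrs q := pvNbrs_symm hq
        cases q with
        | mk q1 q2 =>
          simp only [pvNbrs, List.mem_cons, List.not_mem_nil, or_false] at hpq
          rcases hpq with rfl | rfl | rfl | rfl
          · exact Or.inl hp
          · exact Or.inr (Or.inl hp)
          · exact Or.inr (Or.inr (Or.inl hp))
          · exact Or.inr (Or.inr (Or.inr hp))

-- ===== VERDICT (by name: the statement is the Claim_ definition above) =====
theorem get_region_size_spec : Claim_equal_get_region_size := by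
  intro image sr sc _ _
  unfold Spec_get_region_size
  unfold get_region_size get_region_size_alt
  by_cases hempty : image = [] ∨ image.headI = []
  · simp [hempty]
  · rw [if_neg hempty, if_neg hempty]
    set rows : Int := (image.length : Int) with hrows
    set cols : Int := (image.headI.length : Int) with hcols
    set target := pvCell image sr sc with htarget
    set s : Int × Int := (sr, sc) with hs
    have hV0 : PySem.Set.ofList [s] = [s] := rfl
    have hB : rows.toNat * cols.toNat = image.length * image.headI.length := by
      simp [hrows, hcols]
    -- run the BFS invariant from the initial state
    have hbfs := pvBfs_main image rows cols target s
      (image.length * image.headI.length + 2) [s] [s] 0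
      (by simp)
      (by intro p hp; simpa using hp)
      (by simp)
      (by intro p hp; right; simpa using hp)
      (by intro p hp; rcases List.mem_singleton.mp hp with rfl; exact pvReach.refl)
      (by intro p hp hpq; exact absurd (by simpa using hp) (by simpa using hpq))
      (by
        simp only [List.length_singleton]
        rw [hB]
        generalize image.length * image.headI.length = P
        omega)
    -- run the label-propagation loop from the initial state
    have hlp := pvLP_main image rows cols target s
      (image.length * image.headI.length + 3) [s]
      (by simp)
      (by intro p hp; right; simpa using hp)
      (by intro p hp; rcases List.mem_singleton.mp hp with rfl; exact pvReach.refl)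
      (by
        simp only [List.length_singleton]
        rw [hB]
        generalize image.length * image.headI.length = P
        omega)
    obtain ⟨a1, a2, a3, a4, a5⟩ := hbfs
    obtain ⟨F, b1, b2, b3, b4, b5⟩ := hlp
    set FA := (pvBfsShadow image rows cols target (image.length * image.headI.length + 2) [s] [s] 0).2 with hFA
    have hsA : s ∈ FA := a2 s (List.mem_singleton.mpr rfl)
    have hsB : s ∈ F := b2 s (List.mem_singleton.mpr rfl)
    -- the BFS visited set and the label-propagation region have the same members
    have hAB : ∀ x, x ∈ FA ↔ x ∈ F := by
      intro x
      constructor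
      · intro hx
        exact pvReach_subset hsB b5 x (a4 x hx)
      · intro hx
        exact pvReach_subset hsA a5 x (b4 x hx)
    have hperm : FA.Perm F := (List.perm_ext_iff_of_nodup a3 b3).mpr hAB
    have hlen : FA.length = F.length := hperm.length_eq
    rw [hV0, pvBfsLoop_eq_shadow, b1]
    simp only [List.length_singleton] at a1
    rw [hlen] at a1
    omega
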